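-- pv_equiv track=rewrite | github.com/chaberwenwen/sve_rag | v4/finetune/prepare_data.py | _build_name_to_cardno
-- ===== SOURCE A (Python) =====
-- def _build_name_to_cardno(cards: list[dict]) -> dict[str, str]:
--     """构建「卡牌中文名 → cardno」反向索引（同名取最早弹包）。"""
--     name_to_cardno: dict[str, str] = {}
--     for c in cards:
--         name = c.get('name', '').strip()
--         if name:
--             existing = name_to_cardno.get(name)
--             if existing is None or c['cardno'] < existing:
--                 name_to_cardno[name] = c['cardno']
--     return name_to_cardno
-- ===== SOURCE B (Python) =====
-- def _build_name_to_cardno(cards: list[dict]) -> dict[str, str]: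
--     """Two-pass: group every cardno by name, then reduce each group with min()."""
--     groups: dict[str, list[str]] = {}
--     for c in cards:
--         name = c.get('name', '').strip()
--         if name:
--             groups.setdefault(name, []).append(c['cardno'])
--     return {name: min(nos) for name, nos in groups.items()}
-- ===== Notes on version B (the rewrite author's own statement) =====
-- stated objective: alternative
-- what changed: Instead of keeping a running minimum per name in one dict, B first groups all cardnos per name into lists (setdefault/append pass) and then reduces each group with min() in a separate comprehension pass.
import Mathlib
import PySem

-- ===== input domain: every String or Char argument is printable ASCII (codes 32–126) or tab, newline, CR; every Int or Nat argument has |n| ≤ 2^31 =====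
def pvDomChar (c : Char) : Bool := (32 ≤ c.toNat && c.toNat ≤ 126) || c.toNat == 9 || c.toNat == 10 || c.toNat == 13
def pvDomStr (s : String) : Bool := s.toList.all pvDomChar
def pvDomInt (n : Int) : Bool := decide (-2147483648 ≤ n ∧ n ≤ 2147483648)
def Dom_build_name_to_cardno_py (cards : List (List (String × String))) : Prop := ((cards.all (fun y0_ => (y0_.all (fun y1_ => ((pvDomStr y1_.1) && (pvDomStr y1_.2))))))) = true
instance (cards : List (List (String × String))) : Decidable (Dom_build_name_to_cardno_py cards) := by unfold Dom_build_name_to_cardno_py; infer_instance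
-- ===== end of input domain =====

-- B groups all cardnos per name into lists and reduces each group with min() in a second pass,
-- instead of A's single running-minimum dict; same cost, different decomposition.

-- ===== PORT A =====
-- loop body of A (kept as a named helper; the fold below is the 'for c in cards' loop)
def pvStepA (d : PySem.Dict String String) (c : List (String × String)) : PySem.Dict String String :=
  -- name = c.get('name', '').strip()  (written out at each use site)
  if PySem.Str.strip ((PySem.Dict.ofList c).getD "name" "") ≠ "" then
    match (PySem.Dict.ofList c).get? "cardno" with
    | none => d          -- c['cardno'] raises KeyError in Python; such inputs are outside Pre_
    | some v =>
      match d.get? (PySem.Str.strip ((PySem.Dict.ofList c).getD "name" "")) with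
      | none => d.insert (PySem.Str.strip ((PySem.Dict.ofList c).getD "name" "")) v
      | some existing =>
        if v < existing then d.insert (PySem.Str.strip ((PySem.Dict.ofList c).getD "name" "")) v
        else d
  else d

def build_name_to_cardno_py (cards : List (List (String × String))) : List (String × String) :=
  (cards.foldl pvStepA PySem.Dict.empty).items

-- ===== PORT B =====
-- min(nos) for a nonempty list of strings (Python's min = first minimal element)
def pvMin (nos : List String) : String :=
  (PySem.List.min? nos (fun x => x)).getD ""

-- loop body of B's first (grouping) pass
def pvStepB (g : PySem.Dict String (List String)) (c : List (String × String)) : PySem.Dict String (List String) :=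
  if PySem.Str.strip ((PySem.Dict.ofList c).getD "name" "") ≠ "" then
    match (PySem.Dict.ofList c).get? "cardno" with
    | none => g          -- c['cardno'] raises KeyError in Python; such inputs are outside Pre_
    | some v => g.modify (PySem.Str.strip ((PySem.Dict.ofList c).getD "name" "")) [] (· ++ [v])
  else g

def build_name_to_cardno_py_alt (cards : List (List (String × String))) : List (String × String) :=
  let groups := cards.foldl pvStepB PySem.Dict.empty
  groups.items.map (fun p => (p.1, pvMin p.2))

-- ===== PRECONDITION & SPEC =====
-- Pre_ excludes exactly the inputs where Python A raises KeyError: a card whose name is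
-- truthy after stripping — i.e. contains a non-whitespace character (on Dom's character
-- set, 32–126 plus tab/newline/CR, whitespace is exactly ' ', tab, newline, CR) — but
-- which has no 'cardno' key (B raises the same KeyError there).
def Pre_build_name_to_cardno_py (cards : List (List (String × String))) : Prop :=
  ∀ c ∈ cards,
    (((PySem.Dict.ofList c).getD "name" "").toList.any
        (fun ch => ¬ (ch = ' ' ∨ ch = '	' ∨ ch = '\n' ∨ ch = '\r'))) = true →
    (PySem.Dict.ofList c).contains "cardno" = true
instance (cards : List (List (String × String))) : Decidable (Pre_build_name_to_cardno_py cards) := by unfold Pre_build_name_to_cardno_py; infer_instance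

def pvWitness_build_name_to_cardno_py : (List (List (String × String))) :=
  [[("name", " Alice "), ("cardno", "B01")],
   [("name", "Alice"), ("cardno", "A02")],
   [("name", "  ")],
   [("name", "Bob"), ("cardno", "C3")]]

def Spec_build_name_to_cardno_py (cards : List (List (String × String))) (out : List (String × String)) : Prop := out = build_name_to_cardno_py_alt cards
instance (cards : List (List (String × String))) (out : List (String × String)) : Decidable (Spec_build_name_to_cardno_py cards out) := by unfold Spec_build_name_to_cardno_py; infer_instance

-- ===== CLAIM (what is proved, stated in full; the proofs are below) =====
def Claim_equal_build_name_to_cardno_py : Prop := ∀ (cards : List (List (String × String))), Dom_build_name_to_cardno_py cards → Pre_build_name_to_cardno_py cards → Spec_build_name_to_cardno_py cards (build_name_to_cardno_py cards)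

-- ===== LEMMAS AND PROOFS =====

-- mapping f over the values of a dict's items commutes with get?
theorem pv_get?_mk_map (items : List (String × List String)) (f : List String → String) (k : String) :
    (PySem.Dict.mk (items.map (fun p => (p.1, f p.2)))).get? k
      = ((PySem.Dict.mk items).get? k).map f := by
  induction items with
  | nil => rfl
  | cons h t ih =>
    obtain ⟨a, b⟩ := h
    simp only [List.map_cons, PySem.Dict.get?_mk_cons]
    by_cases hk : (a == k) = true <;> simp [hk, ih]

theorem pv_contains_mk_map (items : List (String × List String)) (f : List String → String) (k : String) :
    (PySem.Dict.mk (items.map (fun p => (p.1, f p.2)))).contains k = (PySem.Dict.mk items).contains k := by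
  simp [PySem.Dict.contains, List.any_map, Function.comp_def]

theorem pv_insert_mk_map (items : List (String × List String)) (f : List String → String)
    (k : String) (vs : List String) :
    ((PySem.Dict.mk (items.map (fun p => (p.1, f p.2)))).insert k (f vs)).items
      = ((PySem.Dict.mk items).insert k vs).items.map (fun p => (p.1, f p.2)) := by
  simp only [PySem.Dict.insert, pv_contains_mk_map]
  by_cases hc : (PySem.Dict.mk items).contains k = true
  · simp only [hc, if_true, List.map_map]
    apply List.map_congr_left
    intro q _
    by_cases hk : q.1 = k <;> simp [hk]
  · simp [hc]

theorem pv_min_singleton (v : String) : pvMin [v] = v := rfl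

theorem pv_min_append (vs : List String) (v : String) (h : vs ≠ []) :
    pvMin (vs ++ [v]) = if v < pvMin vs then v else pvMin vs := by
  obtain ⟨m, hm⟩ : ∃ m, PySem.List.min? vs (fun z => z) = some m := by
    cases hmn : PySem.List.min? vs (fun z => z) with
    | none => exact absurd ((PySem.List.min?_eq_none_iff _ _).mp hmn) h
    | some m => exact ⟨m, rfl⟩
  have h1 : PySem.List.min? (vs ++ [v]) (fun z => z) = if v < m then some v else some m := by
    simp only [PySem.List.min?] at hm ⊢
    rw [List.foldl_append, hm]
    simp only [List.foldl_cons, List.foldl_nil]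
  unfold pvMin
  rw [h1, hm]
  by_cases hv : v < m
  · simp [hv]
  · simp [hv]

-- an entry of a Nodup-keyed dict with key k carries get?'s value
theorem pv_entry_unique (g : PySem.Dict String (List String)) (hnd : g.keys.Nodup)
    (k : String) (vs : List String) (hget : g.get? k = some vs)
    (q : String × List String) (hq : q ∈ g.items) (hk : q.1 = k) : q = (k, vs) := by
  have := PySem.Dict.get?_of_mem_items (d := g) (k := q.1) (v := q.2) (by simpa using hq) hnd
  rw [hk, hget] at this
  have h2 : q.2 = vs := by injection this.symm
  exact Prod.ext hk h2

theorem pv_get?_some_contains (g : PySem.Dict String (List String)) (k : String)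
    (vs : List String) (hg : g.get? k = some vs) : g.contains k = true := by
  simp only [PySem.Dict.get?, Option.map_eq_some_iff] at hg
  obtain ⟨p, hp, -⟩ := hg
  have hps := List.find?_some hp
  simp only [PySem.Dict.contains]
  exact List.any_eq_true.mpr ⟨p, List.mem_of_find?_eq_some hp, hps⟩

-- the key one-step commutation: A's running-min step on the reduced dict = reduce after B's grouping step
theorem pv_step_comm (g : PySem.Dict String (List String)) (hnd : g.keys.Nodup)
    (hne : ∀ p ∈ g.items, p.2 ≠ []) (c : List (String × String)) :
    (pvStepA (PySem.Dict.mk (g.items.map (fun p => (p.1, pvMin p.2)))) c).items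
      = (pvStepB g c).items.map (fun p => (p.1, pvMin p.2)) := by
  unfold pvStepA pvStepB
  set name := PySem.Str.strip ((PySem.Dict.ofList c).getD "name" "") with hname
  by_cases hn : name ≠ ""
  · rw [if_pos hn, if_pos hn]
    cases hv : (PySem.Dict.ofList c).get? "cardno" with
    | none => rfl
    | some v =>
      simp only [pv_get?_mk_map]
      cases hg : g.get? name with
      | none =>
        -- new name: B starts the group as [v], A inserts v
        have hmod : g.modify name [] (· ++ [v]) = g.insert name [v] := by
          simp [PySem.Dict.modify, PySem.Dict.getD_eq_get?_getD, hg]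
        rw [hmod]
        have := pv_insert_mk_map g.items pvMin name [v]
        simpa [pv_min_singleton] using this
      | some vs =>
        have hvs : vs ≠ [] := by
          have hfind := hg
          simp only [PySem.Dict.get?, Option.map_eq_some_iff] at hfind
          obtain ⟨p, hp, hp2⟩ := hfind
          have := hne p (List.mem_of_find?_eq_some hp)
          simpa [hp2] using this
        have hmod : g.modify name [] (· ++ [v]) = g.insert name (vs ++ [v]) := by
          simp [PySem.Dict.modify, PySem.Dict.getD_eq_get?_getD, hg]
        rw [hmod]
        by_cases hlt : v < pvMin vs
        · -- new card is smaller: both sides overwrite with v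
          simp only [Option.map_some, hlt, if_true]
          have := pv_insert_mk_map g.items pvMin name (vs ++ [v])
          rwa [pv_min_append vs v hvs, if_pos hlt] at this
        · -- not smaller: A keeps its dict; B's insert rewrites the entry with the same min
          simp only [Option.map_some, hlt, if_false]
          rw [PySem.Dict.items_insert_of_contains _ _ (pv_get?_some_contains g name vs hg),
            List.map_map]
          refine (List.map_congr_left ?_).symm
          intro q hq
          by_cases hk : q.1 = name
          case pos =>
            have hqe : q = (name, vs) := pv_entry_unique g hnd name vs hg q hq hk
            simp [hqe, pv_min_append vs v hvs, hlt]
          case neg =>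
            simp [hk]
  · rw [if_neg hn, if_neg hn]

theorem pv_stepB_nodup (g : PySem.Dict String (List String)) (hnd : g.keys.Nodup)
    (c : List (String × String)) : (pvStepB g c).keys.Nodup := by
  unfold pvStepB
  by_cases hn : PySem.Str.strip ((PySem.Dict.ofList c).getD "name" "") ≠ ""
  · rw [if_pos hn]
    cases h : (PySem.Dict.ofList c).get? "cardno" with
    | none => exact hnd
    | some v => simpa [PySem.Dict.modify] using PySem.Dict.nodup_keys_insert _ _ _ hnd
  · rw [if_neg hn]; exact hnd

theorem pv_stepB_nonempty (g : PySem.Dict String (List String))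
    (hne : ∀ p ∈ g.items, p.2 ≠ []) (c : List (String × String)) :
    ∀ p ∈ (pvStepB g c).items, p.2 ≠ [] := by
  unfold pvStepB
  by_cases hn : PySem.Str.strip ((PySem.Dict.ofList c).getD "name" "") ≠ ""
  · rw [if_pos hn]
    cases h : (PySem.Dict.ofList c).get? "cardno" with
    | none => exact hne
    | some v =>
      intro p hp
      simp only [PySem.Dict.modify] at hp
      rcases (PySem.Dict.mem_items_insert _ _ _ _).mp hp with hpe | ⟨hpm, -⟩
      · simp [hpe]
      · exact hne p hpm
  · rw [if_neg hn]; exact hne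

theorem pv_loop_inv (cards : List (List (String × String))) :
    ∀ (g : PySem.Dict String (List String)), g.keys.Nodup → (∀ p ∈ g.items, p.2 ≠ []) →
    (cards.foldl pvStepA (PySem.Dict.mk (g.items.map (fun p => (p.1, pvMin p.2))))).items
      = (cards.foldl pvStepB g).items.map (fun p => (p.1, pvMin p.2)) := by
  induction cards with
  | nil => intro g _ _; rfl
  | cons c rest ih =>
    intro g hnd hne
    simp only [List.foldl_cons]
    have hstep : pvStepA (PySem.Dict.mk (g.items.map (fun p => (p.1, pvMin p.2)))) c
        = PySem.Dict.mk ((pvStepB g c).items.map (fun p => (p.1, pvMin p.2))) := by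
      apply PySem.Dict.ext; exact pv_step_comm g hnd hne c
    rw [hstep]
    exact ih (pvStepB g c) (pv_stepB_nodup g hnd c) (pv_stepB_nonempty g hne c)

-- ===== VERDICT (by name: the statement is the Claim_ definition above) =====
theorem build_name_to_cardno_py_spec : Claim_equal_build_name_to_cardno_py := by
  intro cards _ _
  unfold Spec_build_name_to_cardno_py build_name_to_cardno_py build_name_to_cardno_py_alt
  have := pv_loop_inv cards PySem.Dict.empty (by simp [PySem.Dict.empty, PySem.Dict.keys])
    (by simp [PySem.Dict.empty])
  simpa [PySem.Dict.empty] using this
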